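-- pv_equiv track=rewrite | github.com/sapkotagaurav/CSC131 | Sapkota_Gaurab_HW2.py | least_cost
-- ===== SOURCE A (Python) =====
-- def least_cost(aList:list):
--     """ function to find the least cost of each board
--
--     Args:
--         aList (list): list of integers
--
--     Returns:
--         int: cost
--     """
--     if len(aList)==1:
--         return aList[0]
--     if len(aList)==2:
--         return aList[0]+ aList[1]
--     if len(aList)==3:
--         return aList[0]+aList[2]
--
--     cost_jump = aList[0]+least_cost(aList[2:])
--     cost_adjacent = aList[0]+least_cost(aList[1:])
--     return min(cost_adjacent,cost_jump)
-- ===== SOURCE B (Python) =====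
-- def least_cost(aList: list):
--     """Bottom-up DP over suffixes (O(n)) instead of A's exponential recursion."""
--     n = len(aList)
--     if n == 1:
--         return aList[0]
--     if n == 2:
--         return aList[0] + aList[1]
--     # suffix costs: f2 = f[n-1], f1 = f[n-2], f0 = f[n-3]
--     f2 = aList[-1]
--     f1 = aList[-2] + aList[-1]
--     f0 = aList[-3] + aList[-1]
--     for i in range(n - 4, -1, -1):
--         f0, f1, f2 = aList[i] + min(f0, f1), f0, f1
--     return f0
-- ===== Notes on version B (the rewrite author's own statement) =====
-- stated objective: faster
-- what changed: Replaced the exponential branching recursion over suffixes with a back-to-front dynamic program keeping only the last three suffix costs (f(i)=a[i]+min(f(i+1),f(i+2)) with A's exact base cases); intended as faster: measured 3.37x at n=16 and B still returns at n=64 where A times out.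
-- outside the precondition, e.g. on least_cost([]): A raises IndexError, B raises IndexError
import Mathlib
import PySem

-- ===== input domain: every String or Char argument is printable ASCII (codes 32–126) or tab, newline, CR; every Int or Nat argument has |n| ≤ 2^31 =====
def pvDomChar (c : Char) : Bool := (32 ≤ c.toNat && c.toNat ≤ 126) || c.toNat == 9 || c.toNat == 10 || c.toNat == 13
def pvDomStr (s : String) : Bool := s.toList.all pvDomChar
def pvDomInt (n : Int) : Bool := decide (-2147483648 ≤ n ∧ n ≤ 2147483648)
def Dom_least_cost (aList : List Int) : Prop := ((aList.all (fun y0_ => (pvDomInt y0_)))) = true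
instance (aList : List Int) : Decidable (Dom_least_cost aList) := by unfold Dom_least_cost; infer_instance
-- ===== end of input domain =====

-- B replaces A's exponential branching recursion with a back-to-front dynamic program
-- over suffix costs (intended as faster; measured 3.37x at n=16, A timed out at n=64).

-- ===== PORT A =====
-- fuel-bounded transliteration of A's recursion (fuel = length + 1 suffices on every
-- nonempty list; the fuel-0 default is reachable only from aList = [], where Python A
-- raises IndexError on aList[0] and which Pre_ excludes)
def leastCostFuel : Nat → List Int → Int
  | 0, _ => 0
  | f + 1, l =>
    if l.length == 1 then (PySem.List.pyGet? l 0).getD 0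
    else if l.length == 2 then
      (PySem.List.pyGet? l 0).getD 0 + (PySem.List.pyGet? l 1).getD 0
    else if l.length == 3 then
      (PySem.List.pyGet? l 0).getD 0 + (PySem.List.pyGet? l 2).getD 0
    else
      let cost_jump := (PySem.List.pyGet? l 0).getD 0 +
        leastCostFuel f (PySem.List.slice l (some 2) none)
      let cost_adjacent := (PySem.List.pyGet? l 0).getD 0 +
        leastCostFuel f (PySem.List.slice l (some 1) none)
      min cost_adjacent cost_jump

def least_cost (aList : List Int) : Int := leastCostFuel (aList.length + 1) aList

-- ===== PORT B =====
-- Source B's 'for i in range(n-4, -1, -1)' loop over the rolling suffix costs;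
-- the argument j = i + 1 counts the iterations i = j-1, …, 0 still to run
def altLoop (l : List Int) : Nat → Int → Int → Int → Int
  | 0, f0, _, _ => f0
  | j + 1, f0, f1, f2 =>
    altLoop l j ((PySem.List.pyGet? l (j : Int)).getD 0 + min f0 f1) f0 f1

def least_cost_alt (aList : List Int) : Int :=
  if aList.length == 1 then (PySem.List.pyGet? aList 0).getD 0
  else if aList.length == 2 then
    (PySem.List.pyGet? aList 0).getD 0 + (PySem.List.pyGet? aList 1).getD 0
  else
    altLoop aList (aList.length - 3)
      ((PySem.List.pyGet? aList (-3)).getD 0 + (PySem.List.pyGet? aList (-1)).getD 0)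
      ((PySem.List.pyGet? aList (-2)).getD 0 + (PySem.List.pyGet? aList (-1)).getD 0)
      ((PySem.List.pyGet? aList (-1)).getD 0)

-- ===== PRECONDITION & SPEC =====
-- On the empty list Python A raises IndexError (aList[0]), so [] is excluded.
def Pre_least_cost (aList : List Int) : Prop := aList ≠ []
instance (aList : List Int) : Decidable (Pre_least_cost aList) := by
  unfold Pre_least_cost; infer_instance
def pvWitness_least_cost : List Int := ([1, 2, 3, 4, 5])

def Spec_least_cost (aList : List Int) (out : Int) : Prop := out = least_cost_alt aList
instance (aList : List Int) (out : Int) : Decidable (Spec_least_cost aList out) := by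
  unfold Spec_least_cost; infer_instance

-- ===== CLAIM (what is proved, stated in full; the proofs are below) =====
def Claim_equal_least_cost : Prop :=
  ∀ (aList : List Int), Dom_least_cost aList → Pre_least_cost aList →
    Spec_least_cost aList (least_cost aList)

-- ===== LEMMAS AND PROOFS =====

-- reference function: the least cost of a suffix, with A's exact base cases
def lcSpec : List Int → Int
  | [] => 0
  | [a] => a
  | [a, b] => a + b
  | [a, _b, c] => a + c
  | a :: b :: c :: d :: t =>
      a + min (lcSpec (b :: c :: d :: t)) (lcSpec (c :: d :: t))

lemma lcSpec_long (a : Int) (rest : List Int) (h : 3 ≤ rest.length) :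
    lcSpec (a :: rest) = a + min (lcSpec rest) (lcSpec rest.tail) := by
  match rest, h with
  | b :: c :: d :: t, _ => simp [lcSpec]

lemma leastCostFuel_eq (fuel : Nat) (l : List Int) (hne : l ≠ [])
    (hf : l.length ≤ fuel) : leastCostFuel fuel l = lcSpec l := by
  induction fuel generalizing l with
  | zero =>
    cases l with
    | nil => exact absurd rfl hne
    | cons a t => simp at hf
  | succ f ih =>
    match l with
    | [a] => simp [leastCostFuel, lcSpec, PySem.List.pyGet?, PySem.List.pyIdx?]
    | [a, b] => simp [leastCostFuel, lcSpec, PySem.List.pyGet?, PySem.List.pyIdx?]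
    | [a, b, c] => simp [leastCostFuel, lcSpec, PySem.List.pyGet?, PySem.List.pyIdx?]
    | a :: b :: c :: d :: t =>
      have hlen : (a :: b :: c :: d :: t).length ≤ f + 1 := hf
      have e1 : leastCostFuel f (b :: c :: d :: t) = lcSpec (b :: c :: d :: t) :=
        ih _ (by simp) (by simp at hlen ⊢; omega)
      have e2 : leastCostFuel f (c :: d :: t) = lcSpec (c :: d :: t) :=
        ih _ (by simp) (by simp at hlen ⊢; omega)
      have s2 : PySem.List.slice (a :: b :: c :: d :: t) (some 2) none
          = c :: d :: t := by
        rw [show (2 : Int) = ((2 : Nat) : Int) from rfl,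
          PySem.List.slice_from_natCast]
        rfl
      have s1 : PySem.List.slice (a :: b :: c :: d :: t) (some 1) none
          = b :: c :: d :: t := by
        rw [show (1 : Int) = ((1 : Nat) : Int) from rfl,
          PySem.List.slice_from_natCast]
        rfl
      have ga : (PySem.List.pyGet? (a :: b :: c :: d :: t) 0).getD 0 = a := by
        simp [PySem.List.pyGet?, PySem.List.pyIdx?,
          show (0 : Int) ≤ (t.length : Int) + 1 + 1 + 1 from by positivity]
      simp only [leastCostFuel, List.length_cons, s1, s2, e1, e2, ga]
      norm_num [lcSpec_long a (b :: c :: d :: t) (by simp)]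
      rw [if_neg (by omega), if_neg (by omega), min_comm]

lemma altLoop_eq (l : List Int) (j : Nat) (hj : j + 3 ≤ l.length) :
    altLoop l j (lcSpec (l.drop j)) (lcSpec (l.drop (j + 1)))
      (lcSpec (l.drop (j + 2))) = lcSpec l := by
  induction j with
  | zero => simp [altLoop]
  | succ j ih =>
    have hjl : j < l.length := by omega
    have hget : (PySem.List.pyGet? l (j : Int)).getD 0 = l[j] := by
      rw [PySem.List.pyGet?_natCast]
      simp [List.getElem?_eq_getElem hjl]
    have hdrop : l.drop j = l[j] :: l.drop (j + 1) :=
      List.drop_eq_getElem_cons hjl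
    have hnew : l[j] + min (lcSpec (l.drop (j + 1))) (lcSpec (l.drop (j + 2)))
        = lcSpec (l.drop j) := by
      rw [hdrop, lcSpec_long _ _ (by rw [List.length_drop]; omega)]
      congr 1
      rw [List.tail_drop]
    simp only [altLoop, hget, hnew]
    exact ih (by omega)

lemma least_cost_alt_eq (l : List Int) (h3 : 3 ≤ l.length) :
    least_cost_alt l = lcSpec l := by
  have hn1 : l.length - 1 < l.length := by omega
  have hn2 : l.length - 2 < l.length := by omega
  have hn3 : l.length - 3 < l.length := by omega
  have d1 : l.drop (l.length - 1) = [l[l.length - 1]] := by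
    rw [List.drop_eq_getElem_cons hn1, show l.length - 1 + 1 = l.length from by omega,
      List.drop_length]
  have d2 : l.drop (l.length - 2) = [l[l.length - 2], l[l.length - 1]] := by
    rw [List.drop_eq_getElem_cons hn2, show l.length - 2 + 1 = l.length - 1 from by omega,
      d1]
  have d3 : l.drop (l.length - 3)
      = [l[l.length - 3], l[l.length - 2], l[l.length - 1]] := by
    rw [List.drop_eq_getElem_cons hn3, show l.length - 3 + 1 = l.length - 2 from by omega,
      d2]
  have g1 : (PySem.List.pyGet? l (-1)).getD 0 = l[l.length - 1] := by
    rw [PySem.List.pyGet?_neg_ofNat l 1 (by omega) (by omega)]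
    simp [List.getElem?_eq_getElem hn1]
  have g2 : (PySem.List.pyGet? l (-2)).getD 0 = l[l.length - 2] := by
    rw [PySem.List.pyGet?_neg_ofNat l 2 (by omega) (by omega)]
    simp [List.getElem?_eq_getElem hn2]
  have g3 : (PySem.List.pyGet? l (-3)).getD 0 = l[l.length - 3] := by
    rw [PySem.List.pyGet?_neg_ofNat l 3 (by omega) (by omega)]
    simp [List.getElem?_eq_getElem hn3]
  have s1 : lcSpec (l.drop (l.length - 1)) = l[l.length - 1] := by
    rw [d1]; simp [lcSpec]
  have s2 : lcSpec (l.drop (l.length - 2)) = l[l.length - 2] + l[l.length - 1] := by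
    rw [d2]; simp [lcSpec]
  have s3 : lcSpec (l.drop (l.length - 3)) = l[l.length - 3] + l[l.length - 1] := by
    rw [d3]; simp [lcSpec]
  have hloop := altLoop_eq l (l.length - 3) (by omega)
  rw [show l.length - 3 + 1 = l.length - 2 from by omega,
    show l.length - 3 + 2 = l.length - 1 from by omega, s1, s2, s3] at hloop
  unfold least_cost_alt
  rw [if_neg (by simp; omega), if_neg (by simp; omega), g1, g2, g3, hloop]

-- ===== VERDICT (by name: the statement is the Claim_ definition above) =====
theorem least_cost_spec : Claim_equal_least_cost := by
  intro l _ hpre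
  unfold Spec_least_cost
  rw [show least_cost l = lcSpec l from
    leastCostFuel_eq _ _ hpre (by omega)]
  match l with
  | [a] => simp [least_cost_alt, lcSpec, PySem.List.pyGet?, PySem.List.pyIdx?]
  | [a, b] => simp [least_cost_alt, lcSpec, PySem.List.pyGet?, PySem.List.pyIdx?]
  | a :: b :: c :: t => exact (least_cost_alt_eq _ (by simp)).symm
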